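-- pv_equiv track=rewrite | github.com/andreimarks/codepuzzles | adventofcode/2020/aoc_2020_17.py | check_neighbor_activity
-- ===== SOURCE A (Python) =====
-- def check_neighbor_activity(positions, position):
--     x_min, x_max = position[0] - 1, position[0] + 2
--     y_min, y_max = position[1] - 1, position[1] + 2
--     z_min, z_max = position[2] - 1, position[2] + 2
--
--     active_count = 0
--     for x in range(x_min, x_max):
--         for y in range(y_min, y_max):
--             for z in range(z_min, z_max):
--                 check_position = (x,y,z)
--                 if check_position == position:
--                     continue
--                 if check_position in positions and positions[check_position] == "#":
--                     active_count += 1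
--
--     return active_count
-- ===== SOURCE B (Python) =====
-- def check_neighbor_activity(positions, position):
--     count = 0
--     for key, value in positions.items():
--         if value != "#" or key == position:
--             continue
--         if all(abs(key[i] - position[i]) <= 1 for i in range(3)):
--             count += 1
--     return count
-- ===== Notes on version B (the rewrite author's own statement) =====
-- stated objective: alternative
-- what changed: B makes one pass over the dict's items with a Chebyshev-distance (all coordinate deltas <= 1) test instead of probing each of the 27 cells of the 3x3x3 cube against the dict; it trades constant-count dict probes for a linear scan of the stored cells.
import Mathlib
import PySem

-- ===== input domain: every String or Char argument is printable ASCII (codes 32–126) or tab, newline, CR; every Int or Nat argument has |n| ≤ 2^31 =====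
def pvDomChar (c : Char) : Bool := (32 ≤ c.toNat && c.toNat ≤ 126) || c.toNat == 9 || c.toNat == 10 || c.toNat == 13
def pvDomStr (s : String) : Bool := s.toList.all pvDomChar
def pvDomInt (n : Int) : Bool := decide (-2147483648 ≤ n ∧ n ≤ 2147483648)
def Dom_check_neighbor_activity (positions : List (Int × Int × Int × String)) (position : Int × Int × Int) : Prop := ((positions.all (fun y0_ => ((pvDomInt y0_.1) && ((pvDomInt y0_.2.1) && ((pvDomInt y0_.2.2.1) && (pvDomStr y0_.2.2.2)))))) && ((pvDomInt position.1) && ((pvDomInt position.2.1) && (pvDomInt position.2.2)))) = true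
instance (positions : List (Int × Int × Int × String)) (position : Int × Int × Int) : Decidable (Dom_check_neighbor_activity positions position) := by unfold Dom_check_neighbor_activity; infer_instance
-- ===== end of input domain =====

-- B replaces A's 27 fixed cube probes into the dict by one pass over the dict's items with a
-- Chebyshev-distance test; same return value, no speed claim (alternative traversal).

-- ===== PORT A =====
-- dict membership + lookup 'positions[check_position]' on the association list (first match)
def pvLookupA (positions : List (Int × Int × Int × String)) (k : Int × Int × Int) : Option String :=
  match positions with
  | [] => none
  | (a, b, c, v) :: rest => if (a, b, c) = k then some v else pvLookupA rest k

def check_neighbor_activity (positions : List (Int × Int × Int × String)) (position : Int × Int × Int) : Int :=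
  let x_min := position.1 - 1; let x_max := position.1 + 2
  let y_min := position.2.1 - 1; let y_max := position.2.1 + 2
  let z_min := position.2.2 - 1; let z_max := position.2.2 + 2
  (PySem.List.pyRange x_min x_max 1).foldl (fun acc x =>
    (PySem.List.pyRange y_min y_max 1).foldl (fun acc y =>
      (PySem.List.pyRange z_min z_max 1).foldl (fun acc z =>
        if (x, y, z) = position then acc
        else if pvLookupA positions (x, y, z) = some "#" then acc + 1 else acc) acc) acc) 0

-- ===== PORT B =====
def check_neighbor_activity_alt (positions : List (Int × Int × Int × String)) (position : Int × Int × Int) : Int :=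
  positions.foldl (fun count e =>
    if e.2.2.2 = "#" ∧ (e.1, e.2.1, e.2.2.1) ≠ position ∧
       |e.1 - position.1| ≤ 1 ∧ |e.2.1 - position.2.1| ≤ 1 ∧ |e.2.2.1 - position.2.2| ≤ 1
    then count + 1 else count) 0

-- ===== PRECONDITION & SPEC =====
-- 'positions' is a Python dict, whose association-list encoding has pairwise-distinct keys by
-- construction; Pre_ states exactly that (it excludes no input the Python A can receive).
def Pre_check_neighbor_activity (positions : List (Int × Int × Int × String)) (position : Int × Int × Int) : Prop :=
  (positions.map (fun e => (e.1, e.2.1, e.2.2.1))).Nodup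
instance (positions : List (Int × Int × Int × String)) (position : Int × Int × Int) : Decidable (Pre_check_neighbor_activity positions position) := by unfold Pre_check_neighbor_activity; infer_instance

def pvWitness_check_neighbor_activity : (List (Int × Int × Int × String)) × (Int × Int × Int) :=
  ([(0, 0, 1, "#"), (1, 1, 1, "#"), (5, 0, 0, "#"), (0, 1, 0, ".")], (0, 0, 0))

def Spec_check_neighbor_activity (positions : List (Int × Int × Int × String)) (position : Int × Int × Int) (out : Int) : Prop := out = check_neighbor_activity_alt positions position
instance (positions : List (Int × Int × Int × String)) (position : Int × Int × Int) (out : Int) : Decidable (Spec_check_neighbor_activity positions position out) := by unfold Spec_check_neighbor_activity; infer_instance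

-- ===== CLAIM (what is proved, stated in full; the proofs are below) =====
def Claim_equal_check_neighbor_activity : Prop := ∀ (positions : List (Int × Int × Int × String)) (position : Int × Int × Int), Dom_check_neighbor_activity positions position → Pre_check_neighbor_activity positions position → Spec_check_neighbor_activity positions position (check_neighbor_activity positions position)

-- ===== LEMMAS AND PROOFS =====

-- key of a dict entry
def pvKey (e : Int × Int × Int × String) : Int × Int × Int := (e.1, e.2.1, e.2.2.1)

-- countP splits over a pointwise-disjoint disjunction
theorem pv_countP_or {α : Type} (p q : α → Bool) (l : List α)
    (h : ∀ e ∈ l, ¬(p e = true ∧ q e = true)) :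
    l.countP (fun e => p e || q e) = l.countP p + l.countP q := by
  induction l with
  | nil => simp
  | cons a t ih =>
    have ha := h a List.mem_cons_self
    have ih' := ih (fun e he => h e (List.mem_cons_of_mem _ he))
    cases hp : p a with
    | true =>
      have hq : q a = false := by
        cases hq : q a
        · rfl
        · exact absurd ⟨hp, hq⟩ ha
      simp only [List.countP_cons, hp, hq, ih']
      simp; omega
    | false =>
      cases hq : q a <;> simp only [List.countP_cons, hp, hq, ih'] <;> simp <;> omega

-- with distinct keys, counting entries with a given key and value "#" is the lookup indicator
theorem pv_countP_key (positions : List (Int × Int × Int × String)) (k : Int × Int × Int)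
    (h : (positions.map pvKey).Nodup) :
    positions.countP (fun e => decide (pvKey e = k ∧ e.2.2.2 = "#")) =
      (if pvLookupA positions k = some "#" then 1 else 0) := by
  induction positions with
  | nil => simp [pvLookupA]
  | cons a t ih =>
    obtain ⟨a1, a2, a3, av⟩ := a
    rw [List.map_cons, List.nodup_cons] at h
    rw [List.countP_cons]
    by_cases hk : (a1, a2, a3) = k
    · have hz : t.countP (fun e => decide (pvKey e = k ∧ e.2.2.2 = "#")) = 0 := by
        rw [List.countP_eq_zero]
        intro e he
        simp only [decide_eq_true_eq, not_and]
        intro hke _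
        apply h.1
        have hm : pvKey e ∈ t.map pvKey := List.mem_map_of_mem he
        rw [hke, ← hk] at hm
        simpa [pvKey] using hm
      rw [hz]
      by_cases hv : av = "#" <;> simp [pvLookupA, pvKey, hk, hv]
    · rw [ih h.2]
      simp [pvLookupA, pvKey, hk]

-- counting lookup hits over a duplicate-free cell list = counting entries whose key is in it
theorem pv_cells_count (positions : List (Int × Int × Int × String))
    (cells : List (Int × Int × Int)) (hc : cells.Nodup)
    (hp : (positions.map pvKey).Nodup) :
    cells.countP (fun k => decide (pvLookupA positions k = some "#")) =
      positions.countP (fun e => decide (e.2.2.2 = "#" ∧ pvKey e ∈ cells)) := by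
  induction cells with
  | nil => simp
  | cons c cs ih =>
    obtain ⟨hcn, hcs⟩ := List.nodup_cons.mp hc
    rw [List.countP_cons, ih hcs]
    have hsplit : positions.countP (fun e => decide (e.2.2.2 = "#" ∧ pvKey e ∈ c :: cs)) =
        positions.countP (fun e => decide (pvKey e = c ∧ e.2.2.2 = "#")) +
        positions.countP (fun e => decide (e.2.2.2 = "#" ∧ pvKey e ∈ cs)) := by
      rw [← pv_countP_or _ _ _ (by
        intro e _
        simp only [decide_eq_true_eq]
        rintro ⟨⟨hke, -⟩, -, h3⟩
        exact absurd (hke ▸ h3) hcn)]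
      apply List.countP_congr
      intro e _
      simp only [Bool.or_eq_true, decide_eq_true_eq, List.mem_cons]
      tauto
    rw [hsplit, pv_countP_key positions c hp]
    by_cases hl : pvLookupA positions c = some "#" <;> simp [hl] <;> omega

-- a triple countP over a product list, as nested sums (the shape of A's nested loops)
theorem pv_cube_countP (p : Int × Int × Int → Bool) (rx ry rz : List Int) :
    ((rx ×ˢ (ry ×ˢ rz)).countP p : Int) =
      (rx.map (fun x => (ry.map (fun y => ((rz.countP (fun z => p (x, y, z)) : Nat) : Int))).sum)).sum := by
  simp only [SProd.sprod, List.product, List.countP_flatMap, Function.comp_def, List.countP_map]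
  push_cast
  simp [Function.comp_def, List.countP_map]

-- the 3x3x3 cube of cells A probes
def pvCube (position : Int × Int × Int) : List (Int × Int × Int) :=
  (PySem.List.pyRange (position.1 - 1) (position.1 + 2) 1) ×ˢ
  ((PySem.List.pyRange (position.2.1 - 1) (position.2.1 + 2) 1) ×ˢ
   (PySem.List.pyRange (position.2.2 - 1) (position.2.2 + 2) 1))

-- A's triple loop is the countP over the cube cell list (center skipped inside the predicate)
theorem pv_A_count (positions : List (Int × Int × Int × String)) (position : Int × Int × Int) :
    check_neighbor_activity positions position =
      (((pvCube position).countP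
        (fun k => decide (k ≠ position ∧ pvLookupA positions k = some "#")) : Nat) : Int) := by
  simp only [pvCube]
  rw [pv_cube_countP]
  simp only [check_neighbor_activity]
  have hinner : ∀ (x y : Int) (acc : Int),
      (PySem.List.pyRange (position.2.2 - 1) (position.2.2 + 2) 1).foldl (fun acc z =>
        if (x, y, z) = position then acc
        else if pvLookupA positions (x, y, z) = some "#" then acc + 1 else acc) acc =
      acc + (((PySem.List.pyRange (position.2.2 - 1) (position.2.2 + 2) 1).countP
        (fun z => decide ((x, y, z) ≠ position ∧ pvLookupA positions (x, y, z) = some "#")) : Nat) : Int) := by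
    intro x y acc
    rw [show (fun (acc : Int) z =>
        if (x, y, z) = position then acc
        else if pvLookupA positions (x, y, z) = some "#" then acc + 1 else acc) =
      (fun (acc : Int) z => if (x, y, z) ≠ position ∧ pvLookupA positions (x, y, z) = some "#"
        then acc + 1 else acc) from by
      funext acc z; split_ifs <;> tauto]
    rw [PySem.List.foldl_ite_add_one]
  simp only [hinner]
  have hmid : ∀ (x : Int) (acc : Int),
      (PySem.List.pyRange (position.2.1 - 1) (position.2.1 + 2) 1).foldl (fun acc y =>
        acc + (((PySem.List.pyRange (position.2.2 - 1) (position.2.2 + 2) 1).countP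
          (fun z => decide ((x, y, z) ≠ position ∧ pvLookupA positions (x, y, z) = some "#")) : Nat) : Int)) acc =
      acc + ((PySem.List.pyRange (position.2.1 - 1) (position.2.1 + 2) 1).map (fun y =>
        (((PySem.List.pyRange (position.2.2 - 1) (position.2.2 + 2) 1).countP
          (fun z => decide ((x, y, z) ≠ position ∧ pvLookupA positions (x, y, z) = some "#")) : Nat) : Int))).sum := by
    intro x acc
    rw [PySem.List.foldl_add _ (fun y =>
      (((PySem.List.pyRange (position.2.2 - 1) (position.2.2 + 2) 1).countP
        (fun z => decide ((x, y, z) ≠ position ∧ pvLookupA positions (x, y, z) = some "#")) : Nat) : Int))]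
  simp only [hmid]
  rw [PySem.List.foldl_add]
  simp

-- B's loop is a countP
theorem pv_B_count (positions : List (Int × Int × Int × String)) (position : Int × Int × Int) :
    check_neighbor_activity_alt positions position =
      (positions.countP (fun e => decide (e.2.2.2 = "#" ∧ (e.1, e.2.1, e.2.2.1) ≠ position ∧
        |e.1 - position.1| ≤ 1 ∧ |e.2.1 - position.2.1| ≤ 1 ∧ |e.2.2.1 - position.2.2| ≤ 1)) : Nat) := by
  simp only [check_neighbor_activity_alt]
  rw [PySem.List.foldl_ite_add_one]
  simp

-- ===== VERDICT (by name: the statement is the Claim_ definition above) =====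
theorem check_neighbor_activity_spec : Claim_equal_check_neighbor_activity := by
  intro positions position _hdom hpre
  unfold Spec_check_neighbor_activity
  obtain ⟨p1, p2, p3⟩ := position
  rw [pv_A_count, pv_B_count]
  congr 1
  have hstep : ((pvCube (p1, p2, p3)).countP
      (fun k => decide (k ≠ (p1, p2, p3) ∧ pvLookupA positions k = some "#"))) =
      ((pvCube (p1, p2, p3)).filter
        (fun k => decide (k ≠ (p1, p2, p3)))).countP
      (fun k => decide (pvLookupA positions k = some "#")) := by
    rw [List.countP_filter]
    apply List.countP_congr
    intro k _
    simp only [Bool.and_eq_true, decide_eq_true_eq]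
    tauto
  rw [hstep]
  have hc : ((pvCube (p1, p2, p3)).filter
        (fun k => decide (k ≠ (p1, p2, p3)))).Nodup :=
    List.Nodup.filter _ (List.Nodup.product (PySem.List.nodup_pyRange_one _ _)
      (List.Nodup.product (PySem.List.nodup_pyRange_one _ _) (PySem.List.nodup_pyRange_one _ _)))
  rw [pv_cells_count positions _ hc hpre]
  apply List.countP_congr
  intro e _
  simp only [decide_eq_true_eq, pvCube, List.mem_filter, List.mem_product,
    PySem.List.mem_pyRange_one, pvKey, abs_le]
  constructor
  · rintro ⟨hv, ⟨⟨h1, h2, h3⟩, hne⟩⟩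
    exact ⟨hv, by simpa using hne, by omega, by omega, by omega⟩
  · rintro ⟨hv, hne, h1, h2, h3⟩
    exact ⟨hv, ⟨⟨by omega, by omega, by omega⟩, by simpa using hne⟩⟩
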